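-- pv_equiv track=rewrite | github.com/tientea/Fun-exercises | cow_bull_unfinished.py | compare_num
-- ===== SOURCE A (Python) =====
-- def compare_num(digits, user_answer):
--     cowbull=[0,0]
--     for i in range(len(digits)):
--         if digits[i] == user_answer[i]:
--             cowbull[0] += 1
--         else:
--             cowbull[1] += 1
--     return cowbull
-- ===== SOURCE B (Python) =====
-- def compare_num(digits, user_answer):
--     # Divide and conquer: split the index range in half, count each half, combine.
--     def go(lo, hi):
--         if hi - lo == 1:
--             return [1, 0] if digits[lo] == user_answer[lo] else [0, 1]
--         mid = (lo + hi) // 2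
--         left = go(lo, mid)
--         right = go(mid, hi)
--         return [left[0] + right[0], left[1] + right[1]]
--     if not digits:
--         return [0, 0]
--     return go(0, len(digits))
-- ===== Notes on version B (the rewrite author's own statement) =====
-- stated objective: alternative
-- what changed: B counts matches/mismatches by divide-and-conquer on the index range (recursively halving and summing the two halves' [cow,bull] pairs) instead of A's single left-to-right loop mutating a two-cell list.
import Mathlib
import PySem

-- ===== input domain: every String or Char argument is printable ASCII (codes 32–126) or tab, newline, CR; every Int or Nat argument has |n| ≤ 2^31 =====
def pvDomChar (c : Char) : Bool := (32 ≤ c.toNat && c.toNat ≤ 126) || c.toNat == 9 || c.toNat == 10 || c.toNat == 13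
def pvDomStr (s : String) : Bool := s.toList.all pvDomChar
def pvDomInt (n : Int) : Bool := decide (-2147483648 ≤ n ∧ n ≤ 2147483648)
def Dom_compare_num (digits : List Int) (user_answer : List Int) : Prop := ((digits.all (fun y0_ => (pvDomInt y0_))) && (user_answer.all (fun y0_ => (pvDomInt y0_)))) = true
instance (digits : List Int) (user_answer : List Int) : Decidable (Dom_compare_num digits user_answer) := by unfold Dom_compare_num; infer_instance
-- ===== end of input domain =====

-- B counts by divide-and-conquer on the index range (halve, recurse, sum the two
-- [cow,bull] pairs) instead of A's left-to-right loop (objective: alternative).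

-- ===== PORT A =====
-- A's list cowbull=[0,0] is ported as a pair accumulator, rebuilt as a 2-element list on return.
def compare_num (digits : List Int) (user_answer : List Int) : List Int :=
  let cowbull := (PySem.List.pyRange 0 digits.length 1).foldl
    (fun cb i =>
      if PySem.List.pyGetD digits i 0 = PySem.List.pyGetD user_answer i 0
      then (cb.1 + 1, cb.2) else (cb.1, cb.2 + 1))
    ((0 : Int), (0 : Int))
  [cowbull.1, cowbull.2]

-- ===== PORT B =====
-- Source B's inner 'go(lo, hi)'. Python only ever calls it with lo < hi and the
-- recursion halves the range, so a fuel of len(digits) is never exhausted on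
-- reachable calls; fuel and the '≤ 1' base guard exist purely for totality.
def pvGo (digits : List Int) (user_answer : List Int) : Nat → Int → Int → List Int
  | 0, _, _ => [0, 0]
  | fuel + 1, lo, hi =>
    if hi - lo ≤ 1 then
      if PySem.List.pyGetD digits lo 0 = PySem.List.pyGetD user_answer lo 0
      then [1, 0] else [0, 1]
    else
      let mid := PySem.Int.floordiv (lo + hi) 2
      let left := pvGo digits user_answer fuel lo mid
      let right := pvGo digits user_answer fuel mid hi
      [PySem.List.pyGetD left 0 0 + PySem.List.pyGetD right 0 0,
       PySem.List.pyGetD left 1 0 + PySem.List.pyGetD right 1 0]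

def compare_num_alt (digits : List Int) (user_answer : List Int) : List Int :=
  if digits = [] then [0, 0]
  else pvGo digits user_answer digits.length 0 digits.length

-- ===== PRECONDITION & SPEC =====
-- A indexes user_answer[i] for every i < len(digits): a shorter user_answer raises IndexError (B also raises there).
def Pre_compare_num (digits : List Int) (user_answer : List Int) : Prop :=
  digits.length ≤ user_answer.length
instance (digits : List Int) (user_answer : List Int) : Decidable (Pre_compare_num digits user_answer) := by unfold Pre_compare_num; infer_instance
def pvWitness_compare_num : List Int × List Int := ([1, 2, 3], [1, 3, 3])

def Spec_compare_num (digits : List Int) (user_answer : List Int) (out : List Int) : Prop := out = compare_num_alt digits user_answer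
instance (digits : List Int) (user_answer : List Int) (out : List Int) : Decidable (Spec_compare_num digits user_answer out) := by unfold Spec_compare_num; infer_instance

-- ===== CLAIM =====
def Claim_equal_compare_num : Prop := ∀ (digits : List Int) (user_answer : List Int), Dom_compare_num digits user_answer → Pre_compare_num digits user_answer → Spec_compare_num digits user_answer (compare_num digits user_answer)

-- ===== LEMMAS AND PROOFS =====

-- the match count over the index range [lo, hi)
def pvCnt (digits user_answer : List Int) (lo hi : Int) : Int :=
  (PySem.List.pyRange lo hi 1).foldl
    (fun acc i => if PySem.List.pyGetD digits i 0 = PySem.List.pyGetD user_answer i 0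
                  then acc + 1 else acc) 0

-- B's counter with any start value equals start + counter from 0.
theorem pv_bfold_shift (p : Int → Prop) [DecidablePred p] (l : List Int) (a : Int) :
    l.foldl (fun acc i => if p i then acc + 1 else acc) a
      = a + l.foldl (fun acc i => if p i then acc + 1 else acc) 0 := by
  induction l generalizing a with
  | nil => simp
  | cons x xs ih =>
    simp only [List.foldl_cons]
    by_cases h : p x
    · rw [if_pos h, if_pos h, ih (a + 1), ih (0 + 1)]; ring
    · rw [if_neg h, if_neg h, ih a]

-- A's pair fold from (a,b) equals (a + nmatch, b + (length - nmatch)).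
theorem pv_pairfold (p : Int → Prop) [DecidablePred p] (l : List Int) (a b : Int) :
    l.foldl (fun cb i => if p i then (cb.1 + 1, cb.2) else (cb.1, cb.2 + 1)) (a, b)
      = (a + l.foldl (fun acc i => if p i then acc + 1 else acc) 0,
         b + ((l.length : Int) - l.foldl (fun acc i => if p i then acc + 1 else acc) 0)) := by
  induction l generalizing a b with
  | nil => simp
  | cons x xs ih =>
    simp only [List.foldl_cons, List.length_cons]
    by_cases h : p x
    · rw [if_pos h, if_pos h, ih (a + 1) b, pv_bfold_shift p xs (0 + 1)]
      refine Prod.ext ?_ ?_ <;> simp <;> push_cast <;> ring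
    · rw [if_neg h, if_neg h, ih a (b + 1)]
      refine Prod.ext ?_ ?_ <;> simp <;> push_cast <;> ring

-- splitting pvCnt at a midpoint
theorem pvCnt_split (digits user_answer : List Int) (lo mid hi : Int)
    (h1 : lo ≤ mid) (h2 : mid ≤ hi) :
    pvCnt digits user_answer lo hi
      = pvCnt digits user_answer lo mid + pvCnt digits user_answer mid hi := by
  unfold pvCnt
  rw [PySem.List.pyRange_one_append lo mid hi h1 h2, List.foldl_append,
    pv_bfold_shift (fun i => PySem.List.pyGetD digits i 0 = PySem.List.pyGetD user_answer i 0)]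

-- pvGo computes [matches, length-of-range − matches] on every nonempty range,
-- given fuel at least the range length
theorem pvGo_eq (digits user_answer : List Int) (fuel : Nat) :
    ∀ lo hi : Int, lo < hi → (hi - lo).toNat ≤ fuel →
      pvGo digits user_answer fuel lo hi
        = [pvCnt digits user_answer lo hi,
           (hi - lo) - pvCnt digits user_answer lo hi] := by
  induction fuel with
  | zero => intro lo hi hlt hf; omega
  | succ fuel ih =>
    intro lo hi hlt hf
    rw [pvGo]
    by_cases hb : hi - lo ≤ 1
    · have hhi : hi = lo + 1 := by omega
      subst hhi
      have hr : PySem.List.pyRange lo (lo + 1) 1 = [lo] :=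
        PySem.List.pyRange_one_singleton lo
      simp only [if_pos hb]
      unfold pvCnt
      rw [hr]
      split_ifs with h <;> simp [h]
    · have hmid : PySem.Int.floordiv (lo + hi) 2 = (lo + hi) / 2 :=
        PySem.Int.floordiv_eq_ediv_of_pos (by omega)
      simp only [if_neg hb, hmid]
      set mid := (lo + hi) / 2 with hm
      have hb1 : lo < mid := by omega
      have hb2 : mid < hi := by omega
      rw [ih lo mid hb1 (by omega), ih mid hi hb2 (by omega),
          pvCnt_split digits user_answer lo mid hi (by omega) (by omega)]
      simp [PySem.List.pyGetD_ofNat']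
      ring

-- ===== VERDICT =====
theorem compare_num_spec : Claim_equal_compare_num := by
  intro digits user_answer _ _
  unfold Spec_compare_num compare_num compare_num_alt
  rw [pv_pairfold (fun i => PySem.List.pyGetD digits i 0 = PySem.List.pyGetD user_answer i 0)]
  by_cases hd : digits = []
  · subst hd; simp [PySem.List.pyRange_one_eq_nil]
  · rw [if_neg hd,
      pvGo_eq digits user_answer digits.length 0 digits.length
        (by simpa using List.length_pos_iff.mpr hd) (by omega)]
    unfold pvCnt
    simp [PySem.List.length_pyRange_one]
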